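-- pv_equiv track=rewrite | github.com/matthewcp9/458Labs | 458Lab1/demo.py | reverseRight
-- ===== SOURCE A (Python) =====
-- def reverseRight(value, shift):
--    #you know that the first "SHIFT" number of bits were unaffected by the original temper, so use those "SHIFT" bits to further unlock more pieces of the MT, and then once you unlocked more pieces you have "SHIFT times x" bits unlocked which can used to unlock the remaining pices
--    count = 0
--    result = value
--    while (shift * count < 32):
--       unveilBits = result >> shift
--       result = value ^ unveilBits
--       count += 1
--    return result
-- ===== SOURCE B (Python) =====
-- def reverseRight(value, shift):
--     # smallest n with n*shift >= 32: number of tempering terms needed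
--     n = (31 + shift) // shift
--     result = value
--     for j in range(1, n + 1):
--         result ^= value >> (j * shift)
--     return result
-- ===== Notes on version B (the rewrite author's own statement) =====
-- stated objective: alternative
-- what changed: A repeatedly feeds the accumulated result back through 'result = value ^ (result >> shift)'; B first computes the term count n = ceil(32/shift) and XORs n independently right-shifted copies of the original value (result ^= value >> (j*shift) for j = 1..n), relying on right-shift distributing over XOR.
import Mathlib
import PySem

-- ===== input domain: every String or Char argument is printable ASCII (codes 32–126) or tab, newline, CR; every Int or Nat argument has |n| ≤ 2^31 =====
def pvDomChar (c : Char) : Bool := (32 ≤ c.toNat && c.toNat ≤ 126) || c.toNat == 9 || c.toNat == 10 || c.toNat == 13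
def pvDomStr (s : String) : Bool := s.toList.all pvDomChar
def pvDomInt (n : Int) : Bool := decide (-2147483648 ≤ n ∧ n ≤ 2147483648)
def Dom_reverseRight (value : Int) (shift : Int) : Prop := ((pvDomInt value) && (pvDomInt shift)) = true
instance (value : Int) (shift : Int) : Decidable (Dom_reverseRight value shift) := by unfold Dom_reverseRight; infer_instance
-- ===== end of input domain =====

-- B replaces A's feedback loop (each step shifts the accumulated result) by first computing the
-- term count n = ceil(32/shift) and XOR-ing n independently right-shifted copies of the ORIGINAL
-- value; objective: alternative decomposition, bit-for-bit identical for every shift ≥ 1.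

-- ===== PORT A =====
-- A's while loop as fuel recursion: for shift ≥ 1 it runs ceil(32/shift) ≤ 32 iterations, so
-- fuel 33 is never exhausted inside Pre_; for shift ≤ 0 Python raises or diverges (outside Pre_).
def pvALoop (value shift : Int) : Nat → Int → Int → Int
  | 0, _, result => result
  | fuel+1, count, result =>
    if shift * count < 32 then
      pvALoop value shift fuel (count + 1) (PySem.Int.bxor value (result >>> shift.toNat))
    else result

def reverseRight (value : Int) (shift : Int) : Int := pvALoop value shift 33 0 value

-- ===== PORT B =====
def reverseRight_alt (value : Int) (shift : Int) : Int :=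
  let n := PySem.Int.floordiv (31 + shift) shift
  (PySem.List.pyRange 1 (n + 1)).foldl
    (fun result j => PySem.Int.bxor result (value >>> (j * shift).toNat)) value

-- ===== PRECONDITION & SPEC =====
-- Pre_ excludes shift ≤ 0: Python A raises ValueError (negative shift count) for shift < 0 and
-- loops forever for shift = 0.
def Pre_reverseRight (value : Int) (shift : Int) : Prop := 1 ≤ shift
instance (value : Int) (shift : Int) : Decidable (Pre_reverseRight value shift) := by unfold Pre_reverseRight; infer_instance
def pvWitness_reverseRight : Int × Int := (5, 7)

def Spec_reverseRight (value : Int) (shift : Int) (out : Int) : Prop := out = reverseRight_alt value shift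
instance (value : Int) (shift : Int) (out : Int) : Decidable (Spec_reverseRight value shift out) := by unfold Spec_reverseRight; infer_instance

-- ===== CLAIM (what is proved, stated in full; the proofs are below) =====
def Claim_equal_reverseRight : Prop := ∀ (value : Int) (shift : Int), Dom_reverseRight value shift → Pre_reverseRight value shift → Spec_reverseRight value shift (reverseRight value shift)

-- ===== LEMMAS AND PROOFS =====

-- bxor on Int constructors (PySem.Int.bxor is Python's infinite-two's-complement ^)
theorem pv_bxor_natCast_natCast (m n : Nat) : PySem.Int.bxor (m : Int) (n : Int) = ((m ^^^ n : Nat) : Int) := by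
  simp [PySem.Int.bxor]
theorem pv_bxor_natCast_negSucc (m n : Nat) : PySem.Int.bxor (m : Int) (Int.negSucc n) = Int.negSucc (m ^^^ n) := by
  simp [PySem.Int.bxor, Int.negSucc_eq]; omega
theorem pv_bxor_negSucc_natCast (m n : Nat) : PySem.Int.bxor (Int.negSucc m) (n : Int) = Int.negSucc (m ^^^ n) := by
  simp [PySem.Int.bxor, Int.negSucc_eq]; omega
theorem pv_bxor_negSucc_negSucc (m n : Nat) : PySem.Int.bxor (Int.negSucc m) (Int.negSucc n) = ((m ^^^ n : Nat) : Int) := by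
  simp [PySem.Int.bxor, Int.negSucc_eq]; omega

theorem pv_sr_natCast (m k : Nat) : (m : Int) >>> k = ((m >>> k : Nat) : Int) := rfl
theorem pv_sr_negSucc (m k : Nat) : (Int.negSucc m) >>> k = Int.negSucc (m >>> k) := rfl

theorem pv_nat_xor_shiftRight (m n k : Nat) : (m ^^^ n) >>> k = (m >>> k) ^^^ (n >>> k) := by
  apply Nat.eq_of_testBit_eq; intro i
  simp [Nat.testBit_shiftRight, Nat.testBit_xor]

theorem pv_bxor_shiftRight (a b : Int) (k : Nat) :
    (PySem.Int.bxor a b) >>> k = PySem.Int.bxor (a >>> k) (b >>> k) := by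
  cases a <;> cases b <;>
    simp only [Int.ofNat_eq_natCast, pv_bxor_natCast_natCast, pv_bxor_natCast_negSucc,
      pv_bxor_negSucc_natCast, pv_bxor_negSucc_negSucc, pv_sr_natCast, pv_sr_negSucc,
      pv_nat_xor_shiftRight]

theorem pv_shiftRight_shiftRight (x : Int) (a b : Nat) : (x >>> a) >>> b = x >>> (a + b) := by
  cases x <;> simp only [Int.ofNat_eq_natCast, pv_sr_natCast, pv_sr_negSucc, Nat.shiftRight_add]

theorem pv_bxor_assoc (a b c : Int) :
    PySem.Int.bxor (PySem.Int.bxor a b) c = PySem.Int.bxor a (PySem.Int.bxor b c) := by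
  cases a <;> cases b <;> cases c <;>
    simp only [Int.ofNat_eq_natCast, pv_bxor_natCast_natCast, pv_bxor_natCast_negSucc,
      pv_bxor_negSucc_natCast, pv_bxor_negSucc_negSucc, Nat.xor_assoc]

-- XOR of independently shifted copies of value: Xf k = value ^ value>>s ^ … ^ value>>(k*s)
def pvXf (value : Int) (s : Nat) : Nat → Int
  | 0 => value
  | k+1 => PySem.Int.bxor (pvXf value s k) (value >>> ((k+1)*s))

-- one feedback step of A acting on Xf k yields Xf (k+1)
theorem pv_keyX (value : Int) (s : Nat) :
    ∀ k, PySem.Int.bxor value (pvXf value s k >>> s) = pvXf value s (k+1) := by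
  intro k
  induction k with
  | zero => simp [pvXf, one_mul]
  | succ k ih =>
    show PySem.Int.bxor value (pvXf value s (k+1) >>> s) = pvXf value s (k+2)
    rw [show pvXf value s (k+1) = PySem.Int.bxor (pvXf value s k) (value >>> ((k+1)*s)) from rfl,
      pv_bxor_shiftRight, pv_shiftRight_shiftRight, ← pv_bxor_assoc, ih]
    rw [show pvXf value s (k+2) = PySem.Int.bxor (pvXf value s (k+1)) (value >>> ((k+2)*s)) from rfl]
    ring_nf

-- iteration count of A's loop from counter c with the given fuel
def pvCnt (s : Int) : Nat → Int → Nat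
  | 0, _ => 0
  | f+1, c => if s * c < 32 then pvCnt s f (c+1) + 1 else 0

theorem pv_aLoop_X (value shift : Int) :
    ∀ (f : Nat) (c : Int) (k : Nat),
      pvALoop value shift f c (pvXf value shift.toNat k)
        = pvXf value shift.toNat (k + pvCnt shift f c) := by
  intro f
  induction f with
  | zero => intro c k; simp [pvALoop, pvCnt]
  | succ f ih =>
    intro c k
    by_cases h : shift * c < 32
    · simp only [pvALoop, pvCnt, if_pos h]
      rw [pv_keyX, ih]
      ring_nf
    · simp [pvALoop, pvCnt, if_neg h]

theorem pv_cnt_eq (s : Int) (hs : 1 ≤ s) (n : Int)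
    (h1 : s * (n - 1) < 32) (h2 : 32 ≤ s * n) :
    ∀ (f : Nat) (c : Int), 0 ≤ c → 32 ≤ s * (c + f) → (pvCnt s f c : Int) = max (n - c) 0 := by
  intro f
  induction f with
  | zero =>
    intro c hc hfuel
    have hle : n ≤ c := by
      by_contra hlt
      have : s * c ≤ s * (n - 1) := mul_le_mul_of_nonneg_left (by omega) (by omega)
      simp only [Nat.cast_zero, add_zero] at hfuel
      omega
    simp [pvCnt]; omega
  | succ f ih =>
    intro c hc hfuel
    by_cases h : s * c < 32
    · have hcn : c ≤ n - 1 := by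
        by_contra hlt
        have : s * n ≤ s * c := mul_le_mul_of_nonneg_left (by omega) (by omega)
        omega
      have := ih (c + 1) (by omega) (by push_cast at hfuel ⊢; linarith)
      simp only [pvCnt, if_pos h]
      push_cast
      omega
    · have hle : n ≤ c := by
        by_contra hlt
        have : s * c ≤ s * (n - 1) := mul_le_mul_of_nonneg_left (by omega) (by omega)
        omega
      simp [pvCnt, if_neg h]; omega

theorem pv_foldB (value shift : Int) (hs : 1 ≤ shift) :
    ∀ (m : Nat),
      (PySem.List.pyRange 1 ((m : Int) + 1)).foldl
        (fun result j => PySem.Int.bxor result (value >>> (j * shift).toNat)) value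
      = pvXf value shift.toNat m := by
  intro m
  induction m with
  | zero => rfl
  | succ m ih =>
    have hcast : ((m + 1 : Nat) : Int) + 1 = ((m : Int) + 1) + 1 := by push_cast; ring
    rw [hcast, PySem.List.pyRange_one_succ_right (by omega), List.foldl_append]
    simp only [List.foldl, ih]
    have hsh : ((m : Int) + 1) * shift = (((m + 1) * shift.toNat : Nat) : Int) := by
      push_cast [Int.toNat_of_nonneg (by omega : (0:Int) ≤ shift)]
      ring
    rw [hsh, Int.toNat_natCast]
    rfl

-- ===== VERDICT (by name: the statement is the Claim_ definition above) =====
theorem reverseRight_spec : Claim_equal_reverseRight := by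
  intro value shift _ hpre
  unfold Spec_reverseRight reverseRight reverseRight_alt
  have hpos : (0:Int) < shift := by exact hpre
  set n := PySem.Int.floordiv (31 + shift) shift with hn
  have hchar := (PySem.Int.floordiv_eq_iff_of_pos hpos (a := 31 + shift) (q := n)).mp hn.symm
  have h2 : 32 ≤ shift * n := by nlinarith [hchar.2]
  have h1 : shift * (n - 1) < 32 := by nlinarith [hchar.1]
  have hn1 : 1 ≤ n := by nlinarith
  have hcnt : pvCnt shift 33 0 = n.toNat := by
    have := pv_cnt_eq shift hpre n h1 h2 33 0 (by omega)
      (by push_cast; nlinarith)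
    omega
  have hA : pvALoop value shift 33 0 value = pvXf value shift.toNat (pvCnt shift 33 0) := by
    have := pv_aLoop_X value shift 33 0 0
    simpa [pvXf] using this
  rw [hA, hcnt]
  show pvXf value shift.toNat n.toNat
    = (PySem.List.pyRange 1 (n + 1)).foldl
        (fun result j => PySem.Int.bxor result (value >>> (j * shift).toNat)) value
  rw [show n + 1 = ((n.toNat : Int)) + 1 by omega]
  exact (pv_foldB value shift hpre n.toNat).symm
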